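-- pv_equiv track=rewrite | github.com/finnmagnuskverndalen/fenrir | backend/phases/host_discovery.py | _vendor_to_os
-- ===== SOURCE A (Python) =====
-- def _vendor_to_os(vendor: str) -> str:
--     """Map MAC vendor to likely OS/device type."""
--     v = vendor.lower()
--     if any(x in v for x in ['apple']): return 'Apple Device'
--     if any(x in v for x in ['samsung', 'google', 'oneplus', 'xiaomi', 'huawei']): return 'Android / Mobile'
--     if any(x in v for x in ['microsoft']): return 'Windows'
--     if any(x in v for x in ['raspberry', 'raspberr']): return 'Raspberry Pi (Linux)'
--     if any(x in v for x in ['espressif']): return 'IoT (ESP32/ESP8266)'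
--     if any(x in v for x in ['zyxel', 'netgear', 'asus', 'tp-link', 'cisco', 'ubiquiti']): return 'Network Device'
--     if any(x in v for x in ['canon', 'epson', 'hp inc', 'brother', 'xerox']): return 'Printer'
--     if any(x in v for x in ['hikvision', 'dahua', 'axis']): return 'IP Camera'
--     return f'Unknown ({vendor})'
-- ===== SOURCE B (Python) =====
-- PAIRS = [
--     (0, 'Apple Device', 'apple'),
--     (1, 'Android / Mobile', 'samsung'),
--     (1, 'Android / Mobile', 'google'),
--     (1, 'Android / Mobile', 'oneplus'),
--     (1, 'Android / Mobile', 'xiaomi'),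
--     (1, 'Android / Mobile', 'huawei'),
--     (2, 'Windows', 'microsoft'),
--     (3, 'Raspberry Pi (Linux)', 'raspberry'),
--     (3, 'Raspberry Pi (Linux)', 'raspberr'),
--     (4, 'IoT (ESP32/ESP8266)', 'espressif'),
--     (5, 'Network Device', 'zyxel'),
--     (5, 'Network Device', 'netgear'),
--     (5, 'Network Device', 'asus'),
--     (5, 'Network Device', 'tp-link'),
--     (5, 'Network Device', 'cisco'),
--     (5, 'Network Device', 'ubiquiti'),
--     (6, 'Printer', 'canon'),
--     (6, 'Printer', 'epson'),
--     (6, 'Printer', 'hp inc'),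
--     (6, 'Printer', 'brother'),
--     (6, 'Printer', 'xerox'),
--     (7, 'IP Camera', 'hikvision'),
--     (7, 'IP Camera', 'dahua'),
--     (7, 'IP Camera', 'axis'),
-- ]
--
-- def _vendor_to_os(vendor: str) -> str:
--     v = vendor.lower()
--     hits = [(p, label) for p, label, key in PAIRS if key in v]
--     if hits:
--         return min(hits, key=lambda t: t[0])[1]
--     return f'Unknown ({vendor})'
-- ===== Notes on version B (the rewrite author's own statement) =====
-- stated objective: alternative
-- what changed: Instead of eight ordered early-exit branches, B flattens all keywords into (priority, label, keyword) triples, collects ALL matching triples in one comprehension, and selects the label of minimum priority; the default branch fires when no keyword matches.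
import Mathlib
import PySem

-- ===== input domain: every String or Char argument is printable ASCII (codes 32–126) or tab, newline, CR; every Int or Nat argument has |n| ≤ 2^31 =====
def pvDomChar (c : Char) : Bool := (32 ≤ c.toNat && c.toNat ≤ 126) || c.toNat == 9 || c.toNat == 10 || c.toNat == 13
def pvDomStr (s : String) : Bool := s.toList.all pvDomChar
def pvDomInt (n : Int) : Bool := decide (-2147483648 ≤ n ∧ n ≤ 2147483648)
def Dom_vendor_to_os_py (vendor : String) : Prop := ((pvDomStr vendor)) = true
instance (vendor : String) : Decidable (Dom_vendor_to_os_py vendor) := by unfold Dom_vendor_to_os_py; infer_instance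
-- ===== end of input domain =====

-- B replaces the ordered early-exit branch cascade by a flat keyword table: collect ALL matching
-- (priority, label) pairs in one pass, then return the label of minimum priority (alternative; same cost).

-- ===== PORT A =====
def vendor_to_os_py (vendor : String) : String :=
  let v := PySem.Str.lower vendor
  if ["apple"].any (fun x => PySem.Str.isIn x v) then "Apple Device"
  else if ["samsung", "google", "oneplus", "xiaomi", "huawei"].any (fun x => PySem.Str.isIn x v) then "Android / Mobile"
  else if ["microsoft"].any (fun x => PySem.Str.isIn x v) then "Windows"
  else if ["raspberry", "raspberr"].any (fun x => PySem.Str.isIn x v) then "Raspberry Pi (Linux)"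
  else if ["espressif"].any (fun x => PySem.Str.isIn x v) then "IoT (ESP32/ESP8266)"
  else if ["zyxel", "netgear", "asus", "tp-link", "cisco", "ubiquiti"].any (fun x => PySem.Str.isIn x v) then "Network Device"
  else if ["canon", "epson", "hp inc", "brother", "xerox"].any (fun x => PySem.Str.isIn x v) then "Printer"
  else if ["hikvision", "dahua", "axis"].any (fun x => PySem.Str.isIn x v) then "IP Camera"
  else String.ofList ("Unknown (".toList ++ vendor.toList ++ ")".toList)

-- ===== PORT B =====
-- the flat PAIRS table of Source B: (priority, label, keyword)
def pvPairs : List (Nat × String × String) :=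
  [(0, "Apple Device", "apple"),
   (1, "Android / Mobile", "samsung"),
   (1, "Android / Mobile", "google"),
   (1, "Android / Mobile", "oneplus"),
   (1, "Android / Mobile", "xiaomi"),
   (1, "Android / Mobile", "huawei"),
   (2, "Windows", "microsoft"),
   (3, "Raspberry Pi (Linux)", "raspberry"),
   (3, "Raspberry Pi (Linux)", "raspberr"),
   (4, "IoT (ESP32/ESP8266)", "espressif"),
   (5, "Network Device", "zyxel"),
   (5, "Network Device", "netgear"),
   (5, "Network Device", "asus"),
   (5, "Network Device", "tp-link"),
   (5, "Network Device", "cisco"),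
   (5, "Network Device", "ubiquiti"),
   (6, "Printer", "canon"),
   (6, "Printer", "epson"),
   (6, "Printer", "hp inc"),
   (6, "Printer", "brother"),
   (6, "Printer", "xerox"),
   (7, "IP Camera", "hikvision"),
   (7, "IP Camera", "dahua"),
   (7, "IP Camera", "axis")]

def vendor_to_os_py_alt (vendor : String) : String :=
  let v := PySem.Str.lower vendor
  -- hits = [(p, label) for p, label, key in PAIRS if key in v]
  let hits := pvPairs.filterMap (fun t => if PySem.Str.isIn t.2.2 v then some (t.1, t.2.1) else none)
  -- if hits: return min(hits, key=lambda t: t[0])[1]   (min? = none ↔ hits empty)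
  match PySem.List.min? hits (fun t => t.1) with
  | some m => m.2
  | none => String.ofList ("Unknown (".toList ++ vendor.toList ++ ")".toList)

-- ===== PRECONDITION & SPEC =====
def Spec_vendor_to_os_py (vendor : String) (out : String) : Prop := out = vendor_to_os_py_alt vendor
instance (vendor : String) (out : String) : Decidable (Spec_vendor_to_os_py vendor out) := by unfold Spec_vendor_to_os_py; infer_instance

-- ===== CLAIM (what is proved, stated in full; the proofs are below) =====
def Claim_equal_vendor_to_os_py : Prop := ∀ (vendor : String), Dom_vendor_to_os_py vendor → Spec_vendor_to_os_py vendor (vendor_to_os_py vendor)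

-- ===== LEMMAS AND PROOFS =====

-- helper naming B's selection step, used only in the proofs below
def pvBest (v : String) (ps : List (Nat × String × String)) : Option (Nat × String) :=
  PySem.List.min? (ps.filterMap (fun t => if PySem.Str.isIn t.2.2 v then some (t.1, t.2.1) else none)) (fun t => t.1)

-- min? of a constant-(i,L) nonempty prefix followed by strictly larger keys is (i, L)
theorem pv_min_const_prefix (xs ys : List (Nat × String)) (i : Nat) (L : String)
    (hne : xs ≠ []) (hx : ∀ x ∈ xs, x = (i, L)) (hy : ∀ y ∈ ys, i < y.1) :
    PySem.List.min? (xs ++ ys) (fun t => t.1) = some (i, L) := by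
  have hmem : (i, L) ∈ xs ++ ys := by
    cases xs with
    | nil => exact absurd rfl hne
    | cons a t => exact List.mem_append_left _ (by rw [hx a (List.mem_cons_self)]; exact List.mem_cons_self)
  cases hmin : PySem.List.min? (xs ++ ys) (fun t => t.1) with
  | none =>
      rw [PySem.List.min?_eq_none_iff] at hmin
      rw [hmin] at hmem; exact absurd hmem (List.not_mem_nil)
  | some m =>
      have hm : m ∈ xs ++ ys := PySem.List.min?_mem hmin
      have hle : m.1 ≤ i := PySem.List.min?_isMin hmin (i, L) hmem
      rcases List.mem_append.mp hm with h | h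
      · rw [hx m h]
      · exact absurd hle (not_le.mpr (hy m h))

-- one group step: scan++min over (G ++ rest) = "if any keyword of G matches then its label else recurse"
theorem pvBest_group (v : String) (G rest : List (Nat × String × String)) (i : Nat) (L : String)
    (hG : ∀ t ∈ G, t.1 = i ∧ t.2.1 = L) (hrest : ∀ t ∈ rest, i < t.1) :
    pvBest v (G ++ rest) =
      if G.any (fun t => PySem.Str.isIn t.2.2 v) then some (i, L) else pvBest v rest := by
  unfold pvBest
  rw [List.filterMap_append]
  by_cases h : G.any (fun t => PySem.Str.isIn t.2.2 v) = true
  · rw [if_pos h]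
    obtain ⟨t, ht, hmatch⟩ := List.any_eq_true.mp h
    apply pv_min_const_prefix
    · intro hnil
      have : (t.1, t.2.1) ∈ G.filterMap (fun t => if PySem.Str.isIn t.2.2 v then some (t.1, t.2.1) else none) :=
        List.mem_filterMap.mpr ⟨t, ht, by rw [if_pos hmatch]⟩
      rw [hnil] at this; exact absurd this (List.not_mem_nil)
    · intro x hx
      obtain ⟨u, hu, hux⟩ := List.mem_filterMap.mp hx
      by_cases hm : PySem.Str.isIn u.2.2 v = true
      · rw [if_pos hm] at hux
        obtain ⟨h1, h2⟩ := hG u hu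
        rw [← Option.some.inj hux, h1, h2]
      · rw [if_neg hm] at hux; exact absurd hux (by simp)
    · intro y hy
      obtain ⟨u, hu, huy⟩ := List.mem_filterMap.mp hy
      by_cases hm : PySem.Str.isIn u.2.2 v = true
      · rw [if_pos hm] at huy
        rw [← Option.some.inj huy]; exact hrest u hu
      · rw [if_neg hm] at huy; exact absurd huy (by simp)
  · rw [if_neg h]
    have hGnil : G.filterMap (fun t => if PySem.Str.isIn t.2.2 v then some (t.1, t.2.1) else none) = [] := by
      rw [List.filterMap_eq_nil_iff]
      intro t ht
      have : PySem.Str.isIn t.2.2 v ≠ true := fun hc => h (List.any_eq_true.mpr ⟨t, ht, hc⟩)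
      rw [if_neg this]
    rw [hGnil, List.nil_append]

-- ===== VERDICT (by name: the statement is the Claim_ definition above) =====
theorem vendor_to_os_py_spec : Claim_equal_vendor_to_os_py := by
  intro vendor _
  unfold Spec_vendor_to_os_py vendor_to_os_py vendor_to_os_py_alt
  set v := PySem.Str.lower vendor with hv
  change _ = (match pvBest v pvPairs with
    | some m => m.2
    | none => String.ofList ("Unknown (".toList ++ vendor.toList ++ ")".toList))
  rw [show pvPairs = [(0, "Apple Device", "apple")] ++
      ([(1, "Android / Mobile", "samsung"), (1, "Android / Mobile", "google"), (1, "Android / Mobile", "oneplus"), (1, "Android / Mobile", "xiaomi"), (1, "Android / Mobile", "huawei")] ++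
      ([(2, "Windows", "microsoft")] ++
      ([(3, "Raspberry Pi (Linux)", "raspberry"), (3, "Raspberry Pi (Linux)", "raspberr")] ++
      ([(4, "IoT (ESP32/ESP8266)", "espressif")] ++
      ([(5, "Network Device", "zyxel"), (5, "Network Device", "netgear"), (5, "Network Device", "asus"), (5, "Network Device", "tp-link"), (5, "Network Device", "cisco"), (5, "Network Device", "ubiquiti")] ++
      ([(6, "Printer", "canon"), (6, "Printer", "epson"), (6, "Printer", "hp inc"), (6, "Printer", "brother"), (6, "Printer", "xerox")] ++
      ([(7, "IP Camera", "hikvision"), (7, "IP Camera", "dahua"), (7, "IP Camera", "axis")] ++ [])))))))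
    from rfl]
  rw [pvBest_group v _ _ 0 "Apple Device" (by decide) (by decide),
      pvBest_group v _ _ 1 "Android / Mobile" (by decide) (by decide),
      pvBest_group v _ _ 2 "Windows" (by decide) (by decide),
      pvBest_group v _ _ 3 "Raspberry Pi (Linux)" (by decide) (by decide),
      pvBest_group v _ _ 4 "IoT (ESP32/ESP8266)" (by decide) (by decide),
      pvBest_group v _ _ 5 "Network Device" (by decide) (by decide),
      pvBest_group v _ _ 6 "Printer" (by decide) (by decide),
      pvBest_group v _ _ 7 "IP Camera" (by decide) (by decide)]
  simp only [List.any_cons, List.any_nil, Bool.or_false, pvBest, List.filterMap_nil, PySem.List.min?]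
  split_ifs <;> rfl
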